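-- pv_equiv track=rewrite | github.com/yeonssu/Algorithm | baekjoon/구현/17140.py | c_operation
-- ===== SOURCE A (Python) =====
-- def plus_zero(arr):
--     max_cnt = 3
--     for i in range(len(arr)):
--         max_cnt = max(max_cnt, len(arr[i]))
--
--     if max_cnt >= 100:
--         for i in range(len(arr)):
--             arr[i] = arr[i][:100]
--     else:
--         for i in range(len(arr)):
--             arr[i].extend([0] * (max_cnt - len(arr[i])))
--     return arr
--
-- def r_operation(arr):
--     new = []
--     for i in range(len(arr)):
--         sub = set()
--         for a in arr[i]:
--             if a != 0:
--                 sub.add((a, arr[i].count(a)))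
--         sub = list(sub)
--         sub.sort(key=lambda x: (x[1], x[0]))
--         new.append([el for s in sub for el in s])
--     return plus_zero(new)
--
-- def c_operation(arr):
--     n = len(arr)  # 행 길이 계산
--     m = len(arr[0])  # 열 길이 계산
--     new = [[0] * n for _ in range(m)]
--     for i in range(n):
--         for j in range(m):
--             new[j][n - i - 1] = arr[i][j]
--
--     arr = r_operation(new)
--     n = len(arr)  # 행 길이 계산
--     m = len(arr[0])  # 열 길이 계산
--     new = [[0] * n for _ in range(m)]
--     for i in range(n):
--         for j in range(m):
--             if arr[i][j] != 0:
--                 new[j][i] = arr[i][j]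
--     return new
-- ===== SOURCE B (Python) =====
-- def c_operation(arr):
--     n, m = len(arr), len(arr[0])
--     cols = []
--     for j in range(m):
--         vals = sorted(arr[i][j] for i in range(n) if arr[i][j] != 0)
--         runs = []
--         for v in vals:
--             if runs and runs[-1][0] == v:
--                 runs[-1] = (v, runs[-1][1] + 1)
--             else:
--                 runs.append((v, 1))
--         runs.sort(key=lambda p: (p[1], p[0]))
--         cols.append([x for p in runs for x in p])
--     L = max(3, max(len(c) for c in cols))
--     if L >= 100:
--         cols = [c[:100] for c in cols]
--     else:
--         cols = [c + [0] * (L - len(c)) for c in cols]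
--     m2 = len(cols[0])
--     return [[cols[i][j] for i in range(m)] for j in range(m2)]
-- ===== Notes on version B (the rewrite author's own statement) =====
-- stated objective: faster
-- what changed: B drops both rotation passes and replaces hash/set counting entirely by sort-then-scan: for each input column it sorts the nonzero values and run-length-encodes the sorted list, so each (value,count) pair arises from a run instead of a membership structure or a .count scan, then sorts the runs by (count,value), applies the same max(3,...)/100 pad-or-truncate rule, and transposes by comprehension instead of A's conditional write loops.
import Mathlib
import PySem

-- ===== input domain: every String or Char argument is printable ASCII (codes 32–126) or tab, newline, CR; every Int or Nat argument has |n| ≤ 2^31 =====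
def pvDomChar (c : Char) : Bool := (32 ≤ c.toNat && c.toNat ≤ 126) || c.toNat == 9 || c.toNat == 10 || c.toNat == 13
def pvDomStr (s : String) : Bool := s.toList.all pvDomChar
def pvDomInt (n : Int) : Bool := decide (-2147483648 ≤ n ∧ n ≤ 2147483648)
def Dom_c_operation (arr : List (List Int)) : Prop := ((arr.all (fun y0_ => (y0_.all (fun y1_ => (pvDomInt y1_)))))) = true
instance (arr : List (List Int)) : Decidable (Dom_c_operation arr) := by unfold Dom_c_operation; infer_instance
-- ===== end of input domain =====

-- B skips A's two rotation passes and counts by sort-then-scan: per input column it sorts the nonzero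
-- values and run-length-encodes the runs instead of building a set with quadratic row.count; objective: faster.

-- arr[i][j] read; exact on in-range indices (Pre_ keeps every Python read in range)
def pvAt (arr : List (List Int)) (i j : Nat) : Int := (arr.getD i []).getD j 0

-- ===== PORT A =====
def plus_zero (arr : List (List Int)) : List (List Int) :=
  let maxCnt : Int := arr.foldl (fun acc row => max acc ((row.length : Int))) 3
  if maxCnt ≥ 100 then arr.map (fun row => row.take 100)
  else arr.map (fun row => row ++ List.replicate (maxCnt - (row.length : Int)).toNat 0)

-- body of r_operation's per-row loop: set of (value, count) pairs, sorted by (count, value), flattened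
def rRow (row : List Int) : List Int :=
  let sub : PySem.Set (Int × Int) :=
    row.foldl (fun s a => if a ≠ 0 then PySem.Set.add s (a, (row.count a : Int)) else s) PySem.Set.empty
  (PySem.List.sorted2 sub (fun x => x.2) (fun x => x.1)).flatMap (fun s => [s.1, s.2])

def r_operation (arr : List (List Int)) : List (List Int) :=
  plus_zero (arr.foldl (fun new row => new ++ [rRow row]) [])

def c_operation (arr : List (List Int)) : List (List Int) :=
  let n := arr.length
  let m := (arr.getD 0 []).length
  let new1 := (List.range n).foldl (fun g i => (List.range m).foldl
      (fun g2 j => g2.modify j (fun r => r.set (n - i - 1) (pvAt arr i j))) g)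
      ((List.range m).map (fun _ => List.replicate n 0))
  let arr2 := r_operation new1
  let n2 := arr2.length
  let m2 := (arr2.getD 0 []).length
  (List.range n2).foldl (fun g i => (List.range m2).foldl
      (fun g2 j => if pvAt arr2 i j ≠ 0 then g2.modify j (fun r => r.set i (pvAt arr2 i j)) else g2) g)
      ((List.range m2).map (fun _ => List.replicate n2 0))

-- ===== PORT B =====
-- one step of B's run-length loop: 'if runs and runs[-1][0] == v: runs[-1] = (v, cnt+1) else: runs.append((v, 1))'
def rleStep (acc : List (Int × Int)) (v : Int) : List (Int × Int) :=
  match acc.getLast? with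
  | some (w, c) => if w = v then acc.dropLast ++ [(w, c + 1)] else acc ++ [(v, 1)]
  | none => [(v, 1)]

def c_operation_alt (arr : List (List Int)) : List (List Int) :=
  let n := arr.length
  let m := (arr.getD 0 []).length
  let cols := (List.range m).map (fun j =>
    let vals := PySem.List.sorted (((List.range n).map (fun i => pvAt arr i j)).filter
      (fun v => decide (v ≠ 0))) (fun x => x)
    let runs := vals.foldl rleStep []
    (PySem.List.sorted2 runs (fun p => p.2) (fun p => p.1)).flatMap (fun p => [p.1, p.2]))
  -- max(3, max(lens)): Python raises on an empty cols (m = 0, outside Pre_); .getD 0 is unreachable there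
  let L : Int := max 3 ((PySem.List.max? (cols.map (fun c => (c.length : Int))) (fun x => x)).getD 0)
  let cols2 := if L ≥ 100 then cols.map (fun c => c.take 100)
               else cols.map (fun c => c ++ List.replicate (L - (c.length : Int)).toNat 0)
  let m2 := (cols2.getD 0 []).length
  (List.range m2).map (fun j => (List.range m).map (fun i => pvAt cols2 i j))

-- ===== PRECONDITION & SPEC =====
-- distinct nonzero values of column j (used only to state where Python A raises)
def pvDistinct (arr : List (List Int)) (j : Nat) : Nat :=
  ((arr.map (fun row => row.getD j 0)).filter (fun v => v != 0)).dedup.length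

-- Pre_ excludes exactly the inputs where Python A raises IndexError: the empty grid / empty first row,
-- grids whose first row is longer than some other row (arr[i][j] read out of range), and grids where the
-- truncate-to-100 branch (some column with ≥ 50 distinct nonzero values) leaves the intermediate rows
-- jagged with row 0 longest, so the final transpose reads past a shorter row.
def Pre_c_operation (arr : List (List Int)) : Prop :=
  arr ≠ [] ∧ arr.getD 0 [] ≠ [] ∧
  (∀ row ∈ arr, (arr.getD 0 []).length ≤ row.length) ∧
  ((∀ j ∈ List.range (arr.getD 0 []).length, pvDistinct arr j < 50) ∨
   (∀ j ∈ List.range (arr.getD 0 []).length,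
      min 100 (2 * pvDistinct arr 0) ≤ min 100 (2 * pvDistinct arr j)))
instance (arr : List (List Int)) : Decidable (Pre_c_operation arr) := by
  unfold Pre_c_operation; infer_instance
def pvWitness_c_operation : List (List Int) := [[1, 2], [3, 4]]

def Spec_c_operation (arr : List (List Int)) (out : List (List Int)) : Prop := out = c_operation_alt arr
instance (arr : List (List Int)) (out : List (List Int)) : Decidable (Spec_c_operation arr out) := by unfold Spec_c_operation; infer_instance

-- ===== CLAIM (what is proved, stated in full; the proofs are below) =====
def Claim_equal_c_operation : Prop := ∀ (arr : List (List Int)), Dom_c_operation arr → Pre_c_operation arr → Spec_c_operation arr (c_operation arr)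

-- ===== LEMMAS AND PROOFS =====

-- column j of arr, top to bottom
def pvCol (arr : List (List Int)) (j : Nat) : List Int := (List.range arr.length).map (fun i => pvAt arr i j)

theorem pvInner (f : Nat → List Int → List Int) :
    ∀ (m : Nat) (g : List (List Int)) (j : Nat),
      ((List.range m).foldl (fun g2 t => g2.modify t (f t)) g)[j]? =
        if j < m then (g[j]?).map (f j) else g[j]? := by
  intro m
  induction m with
  | zero => intro g j; simp
  | succ m ih =>
    intro g j
    rw [List.range_succ, List.foldl_append]
    simp only [List.foldl_cons, List.foldl_nil, List.getElem?_modify, ih]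
    rcases Nat.lt_trichotomy j m with h | h | h
    · simp only [if_pos h, if_pos (Nat.lt_succ_of_lt h)]
      cases g[j]? <;> simp [Nat.ne_of_gt h]
    · subst h
      simp only [Nat.lt_irrefl, if_pos (Nat.lt_succ_self j)]
      cases g[j]? <;> simp
    · have h1 : ¬ j < m := by omega
      have h2 : ¬ j < m + 1 := by omega
      simp only [if_neg h1, if_neg h2]
      cases g[j]? <;> simp
      intro h3; exact absurd h3 (by omega)

theorem pvOuter (F : Nat → Nat → List Int → List Int) (m : Nat) :
    ∀ (n : Nat) (g : List (List Int)) (j : Nat), j < m →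
      ((List.range n).foldl (fun g' i => (List.range m).foldl (fun g2 t => g2.modify t (F i t)) g') g)[j]? =
        (g[j]?).map (fun r => (List.range n).foldl (fun row i => F i j row) r) := by
  intro n
  induction n with
  | zero => intro g j hj; simp
  | succ n ih =>
    intro g j hj
    rw [List.range_succ, List.foldl_append]
    simp only [List.foldl_cons, List.foldl_nil, List.foldl_append]
    rw [pvInner]
    rw [if_pos hj, ih g j hj]
    cases g[j]? <;> simp

theorem pvRowSetLen (n : Nat) (v : Nat → Int) :
    ∀ t, ((List.range t).foldl (fun row i => row.set (n - i - 1) (v i)) (List.replicate n 0)).length = n := by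
  intro t
  induction t with
  | zero => simp
  | succ t ih => rw [List.range_succ, List.foldl_append]; simp [List.length_set, ih]

theorem pvRowSetIfLen (n : Nat) (w : Nat → Int) :
    ∀ t, ((List.range t).foldl (fun row i => if w i ≠ 0 then row.set i (w i) else row)
        (List.replicate n 0)).length = n := by
  intro t
  induction t with
  | zero => simp
  | succ t ih =>
    rw [List.range_succ, List.foldl_append]
    simp only [List.foldl_cons, List.foldl_nil]
    by_cases hw : w t ≠ 0
    · rw [if_pos hw, List.length_set, ih]
    · rw [if_neg hw, ih]

theorem pvRowSet (n : Nat) (v : Nat → Int) :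
    ∀ t, t ≤ n → ∀ k,
      ((List.range t).foldl (fun row i => row.set (n - i - 1) (v i)) (List.replicate n 0))[k]? =
        if k < n then some (if n - t ≤ k then v (n - 1 - k) else 0) else none := by
  intro t
  induction t with
  | zero =>
    intro _ k
    by_cases hk : k < n <;> simp [hk]
  | succ t ih =>
    intro ht k
    rw [List.range_succ, List.foldl_append]
    simp only [List.foldl_cons, List.foldl_nil]
    rw [List.getElem?_set, pvRowSetLen, ih (by omega)]
    by_cases hk : k < n
    · by_cases he : n - t - 1 = k
      · rw [if_pos he, if_pos (by omega : n - t - 1 < n), if_pos hk, if_pos (by omega : n - (t+1) ≤ k)]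
        have hkt : n - 1 - k = t := by omega
        rw [hkt]
      · rw [if_neg he, if_pos hk, if_pos hk]
        by_cases h2 : n - t ≤ k
        · rw [if_pos h2, if_pos (by omega : n - (t+1) ≤ k)]
        · rw [if_neg h2, if_neg (by omega : ¬ n - (t+1) ≤ k)]
    · rw [if_neg (by omega : ¬ n - t - 1 = k)]
      simp [hk]

theorem pvRowSetIf (n : Nat) (w : Nat → Int) :
    ∀ t, t ≤ n → ∀ k,
      ((List.range t).foldl (fun row i => if w i ≠ 0 then row.set i (w i) else row)
            (List.replicate n 0))[k]? =
        if k < n then some (if k < t ∧ w k ≠ 0 then w k else 0) else none := by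
  intro t
  induction t with
  | zero =>
    intro _ k
    by_cases hk : k < n <;> simp [hk]
  | succ t ih =>
    intro ht k
    rw [List.range_succ, List.foldl_append]
    simp only [List.foldl_cons, List.foldl_nil]
    by_cases hw : w t ≠ 0
    · rw [if_pos hw, List.getElem?_set, pvRowSetIfLen, ih (by omega)]
      by_cases hk : k < n
      · by_cases he : t = k
        · subst he
          have hc : t < t + 1 ∧ w t ≠ 0 := ⟨by omega, hw⟩
          rw [if_pos rfl, if_pos (by omega : t < n), if_pos hc, if_pos hk]
        · rw [if_neg he, if_pos hk, if_pos hk]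
          by_cases h2 : k < t ∧ w k ≠ 0
          · have hc : k < t + 1 ∧ w k ≠ 0 := ⟨by omega, h2.2⟩
            rw [if_pos h2, if_pos hc]
          · rw [if_neg h2, if_neg ?_]
            rintro ⟨h3, h4⟩
            exact h2 ⟨by omega, h4⟩
      · rw [if_neg (by omega : ¬ t = k)]
        simp [hk]
    · rw [if_neg hw, ih (by omega)]
      by_cases hk : k < n
      · rw [if_pos hk, if_pos hk]
        by_cases h2 : k < t ∧ w k ≠ 0
        · have hc : k < t + 1 ∧ w k ≠ 0 := ⟨by omega, h2.2⟩
          rw [if_pos h2, if_pos hc]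
        · rw [if_neg h2, if_neg ?_]
          rintro ⟨h3, h4⟩
          rcases Nat.lt_succ_iff_lt_or_eq.mp h3 with h5 | h5
          · exact h2 ⟨h5, h4⟩
          · exact hw (h5 ▸ h4)
      · simp [hk]

theorem pvFoldlMaxShift : ∀ (l : List Int) (a b : Int), l.foldl max (max a b) = max a (l.foldl max b) := by
  intro l
  induction l with
  | nil => intro a b; simp
  | cons x t ih =>
    intro a b
    simp only [List.foldl_cons]
    rw [max_assoc, ih]

theorem pvSorted2Lex (xs : List (Int × Int)) :
    PySem.List.sorted2 xs (fun x => x.2) (fun x => x.1) false =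
      PySem.List.sorted xs (fun x => (toLex (x.2, x.1) : Lex (Int × Int))) false := by
  rw [PySem.List.sorted_eq_foldl_insertBy]
  show List.foldl (fun acc x => PySem.List.insertBy _ x acc) [] xs = _
  congr 1
  funext acc x
  congr 1
  funext a b
  show (decide (a.2 < b.2) || !decide (b.2 < a.2) && decide (a.1 < b.1)) =
    decide ((toLex (a.2, a.1) : Lex (Int × Int)) < toLex (b.2, b.1))
  have h : ((toLex (a.2, a.1) : Lex (Int × Int)) < toLex (b.2, b.1)) ↔
      (a.2 < b.2 ∨ (a.2 = b.2 ∧ a.1 < b.1)) := by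
    rw [Prod.Lex.lt_iff]; simp
  rcases lt_trichotomy a.2 b.2 with hlt | heq | hgt
  · simp [h, hlt]
  · simp [heq]
    rw [Prod.Lex.lt_iff]; simp
  · simp [h, not_lt.mpr (le_of_lt hgt)]
    simp [hgt]
    intro he; exact absurd he (by omega)

-- ---- B's run-length loop: head-building twin and its invariant ----

-- the same step building the run list back to front (head = newest run)
def rleStepH (acc : List (Int × Int)) (v : Int) : List (Int × Int) :=
  match acc with
  | (w, c) :: t => if w = v then (w, c + 1) :: t else (v, 1) :: (w, c) :: t
  | [] => [(v, 1)]

theorem pvRleStep_rev (l : List (Int × Int)) (v : Int) :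
    rleStep l.reverse v = (rleStepH l v).reverse := by
  cases l with
  | nil => rfl
  | cons p t =>
    obtain ⟨w, c⟩ := p
    by_cases hwv : w = v
    · subst hwv
      simp [rleStep, rleStepH]
    · simp [rleStep, rleStepH, hwv]

theorem pvRleFold_rev : ∀ (vals : List Int) (l : List (Int × Int)),
    vals.foldl rleStep l.reverse = (vals.foldl rleStepH l).reverse := by
  intro vals
  induction vals with
  | nil => intro l; simp
  | cons v t ih =>
    intro l
    simp only [List.foldl_cons]
    rw [pvRleStep_rev, ih]

-- invariant of the head-building loop: after processing p (sorted), the accumulator holds exactly the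
-- pairs (value, count in p) for the distinct values of p, values strictly decreasing from the head
def RleOk (p : List Int) (acc : List (Int × Int)) : Prop :=
  (acc.map Prod.fst).Pairwise (· > ·) ∧
  (∀ x : Int × Int, x ∈ acc ↔ x.1 ∈ p ∧ x.2 = (p.count x.1 : Int)) ∧
  (∀ w c, acc.head? = some (w, c) → w ∈ p ∧ ∀ q ∈ p, q ≤ w) ∧
  (acc = [] → p = [])

theorem pvRleOkStep (p : List Int) (acc : List (Int × Int)) (v : Int)
    (h : RleOk p acc) (hv : ∀ q ∈ p, q ≤ v) : RleOk (p ++ [v]) (rleStepH acc v) := by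
  obtain ⟨hpw, hmem, hhead, hnil⟩ := h
  cases acc with
  | nil =>
    have hp : p = [] := hnil rfl
    subst hp
    refine ⟨by simp [rleStepH], ?_, ?_, by simp [rleStepH]⟩
    · intro x
      simp only [rleStepH, List.nil_append, List.mem_singleton]
      constructor
      · rintro rfl; simp
      · rintro ⟨h1, h2⟩
        obtain ⟨x1, x2⟩ := x
        simp at h1
        subst h1
        simp at h2
        simp [h2]
    · intro w c hw
      simp only [rleStepH, List.head?_cons, Option.some.injEq, Prod.mk.injEq] at hw
      obtain ⟨rfl, rfl⟩ := hw
      simp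
  | cons hd t =>
    obtain ⟨w, c⟩ := hd
    have hwm := hhead w c rfl
    by_cases hwv : w = v
    · subst hwv
      have hstep : rleStepH ((w, c) :: t) w = (w, c + 1) :: t := by simp [rleStepH]
      rw [hstep]
      have hc : c = (p.count w : Int) := ((hmem (w, c)).mp (List.mem_cons_self)).2
      have hpw' : (w :: t.map Prod.fst).Pairwise (· > ·) := by
        simpa only [List.map_cons] using hpw
      have htlt : ∀ y ∈ t.map Prod.fst, y < w := (List.pairwise_cons.mp hpw').1
      refine ⟨by simpa only [List.map_cons] using hpw', ?_, ?_, by simp⟩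
      · intro x
        constructor
        · intro hx
          rcases List.mem_cons.mp hx with rfl | hxt
          · refine ⟨List.mem_append_left _ hwm.1, ?_⟩
            have hcnt : (p ++ [w]).count w = p.count w + 1 := by
              simp [List.count_append]
            rw [hcnt]
            push_cast
            omega
          · have hxm := (hmem x).mp (List.mem_cons_of_mem _ hxt)
            have hxlt : x.1 < w := htlt x.1 (List.mem_map_of_mem hxt)
            have hcnt : (p ++ [w]).count x.1 = p.count x.1 := by
              simp [List.count_append, List.count_singleton']
              omega
            exact ⟨List.mem_append_left _ hxm.1, by rw [hcnt]; exact hxm.2⟩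
        · rintro ⟨hx1, hx2⟩
          by_cases hxw : x.1 = w
          · have hcnt : (p ++ [w]).count x.1 = p.count w + 1 := by
              subst hxw; simp [List.count_append]
            have hx2' : x.2 = c + 1 := by rw [hx2, hcnt]; push_cast; omega
            have : x = (w, c + 1) := by
              obtain ⟨x1, x2⟩ := x; simp only at hxw hx2'; simp [hxw, hx2']
            rw [this]; exact List.mem_cons_self
          · have hx1p : x.1 ∈ p := by
              rcases List.mem_append.mp hx1 with h1 | h1
              · exact h1
              · exact absurd (List.mem_singleton.mp h1) hxw
            have hcnt : (p ++ [w]).count x.1 = p.count x.1 := by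
              simp [List.count_append, List.count_singleton']
              omega
            have hxin : x ∈ (w, c) :: t := (hmem x).mpr ⟨hx1p, by rw [← hcnt]; exact hx2⟩
            rcases List.mem_cons.mp hxin with rfl | hxt
            · exact absurd rfl hxw
            · exact List.mem_cons_of_mem _ hxt
      · intro w' c' hh
        simp only [List.head?_cons, Option.some.injEq, Prod.mk.injEq] at hh
        obtain ⟨rfl, rfl⟩ := hh
        refine ⟨List.mem_append_left _ hwm.1, ?_⟩
        intro q hq
        rcases List.mem_append.mp hq with h1 | h1
        · exact hwm.2 q h1
        · rw [List.mem_singleton.mp h1]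
    · have hwlev : w ≤ v := hv w hwm.1
      have hvnot : v ∉ p := fun hvp => hwv (le_antisymm hwlev (hwm.2 v hvp))
      have hstep : rleStepH ((w, c) :: t) v = (v, 1) :: (w, c) :: t := by simp [rleStepH, hwv]
      rw [hstep]
      have hcv0 : p.count v = 0 := List.count_eq_zero.mpr hvnot
      have hpw' : (w :: t.map Prod.fst).Pairwise (· > ·) := by
        simpa only [List.map_cons] using hpw
      refine ⟨?_, ?_, ?_, by simp⟩
      · simp only [List.map_cons]
        refine List.pairwise_cons.mpr ⟨?_, hpw'⟩
        intro y hy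
        rcases List.mem_cons.mp hy with rfl | hyt
        · omega
        · have hyw := (List.pairwise_cons.mp hpw').1 y hyt
          omega
      · intro x
        constructor
        · intro hx
          rcases List.mem_cons.mp hx with rfl | hxt
          · refine ⟨List.mem_append_right _ (List.mem_singleton.mpr rfl), ?_⟩
            have : (p ++ [v]).count v = 1 := by simp [List.count_append, hcv0]
            simp [this]
          · have hxm := (hmem x).mp hxt
            have hxnv : x.1 ≠ v := fun he => hvnot (he ▸ hxm.1)
            have hcnt : (p ++ [v]).count x.1 = p.count x.1 := by
              simp [List.count_append, List.count_singleton']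
              omega
            exact ⟨List.mem_append_left _ hxm.1, by rw [hcnt]; exact hxm.2⟩
        · rintro ⟨hx1, hx2⟩
          by_cases hxv : x.1 = v
          · have : (p ++ [v]).count x.1 = 1 := by subst hxv; simp [List.count_append, hcv0]
            have hx2' : x.2 = 1 := by rw [hx2, this]; norm_num
            have : x = (v, 1) := by
              obtain ⟨x1, x2⟩ := x; simp only at hxv hx2'; simp [hxv, hx2']
            rw [this]; exact List.mem_cons_self
          · have hx1p : x.1 ∈ p := by
              rcases List.mem_append.mp hx1 with h1 | h1
              · exact h1
              · exact absurd (List.mem_singleton.mp h1) hxv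
            have hcnt : (p ++ [v]).count x.1 = p.count x.1 := by
              simp [List.count_append, List.count_singleton']
              omega
            exact List.mem_cons_of_mem _ ((hmem x).mpr ⟨hx1p, by rw [← hcnt]; exact hx2⟩)
      · intro w' c' hh
        simp only [List.head?_cons, Option.some.injEq, Prod.mk.injEq] at hh
        obtain ⟨rfl, rfl⟩ := hh
        refine ⟨List.mem_append_right _ (List.mem_singleton.mpr rfl), ?_⟩
        intro q hq
        rcases List.mem_append.mp hq with h1 | h1
        · exact le_trans (hv q h1) le_rfl
        · rw [List.mem_singleton.mp h1]

theorem pvRleOkFold : ∀ (vals p : List Int) (acc : List (Int × Int)),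
    (∀ q ∈ p, ∀ r ∈ vals, q ≤ r) → vals.Pairwise (· ≤ ·) → RleOk p acc →
    RleOk (p ++ vals) (vals.foldl rleStepH acc) := by
  intro vals
  induction vals with
  | nil => intro p acc _ _ h; simpa using h
  | cons v t ih =>
    intro p acc hpv hsort h
    have hstep := pvRleOkStep p acc v h (fun q hq => hpv q hq v List.mem_cons_self)
    have hpair := List.pairwise_cons.mp hsort
    have hrec := ih (p ++ [v]) (rleStepH acc v) ?_ hpair.2 hstep
    · simpa using hrec
    · intro q hq r hr
      rcases List.mem_append.mp hq with h1 | h1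
      · exact hpv q h1 r (List.mem_cons_of_mem _ hr)
      · rw [List.mem_singleton.mp h1]; exact hpair.1 r hr

theorem pvRleOk (vals : List Int) (h : vals.Pairwise (· ≤ ·)) :
    RleOk vals (vals.foldl rleStepH []) := by
  have := pvRleOkFold vals [] [] (by simp) h
    ⟨by simp, by simp, by simp, fun _ => rfl⟩
  simpa using this

-- ---- per-column agreement of the two pipelines ----

-- column j of arr, processed: A's rRow of the reversed column = B's sort + run-length compression
theorem pvColEq (arr : List (List Int)) (j : Nat) :
    rRow ((pvCol arr j).reverse) =
      (PySem.List.sorted2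
          ((PySem.List.sorted (((List.range arr.length).map (fun i => pvAt arr i j)).filter
              (fun v => decide (v ≠ 0))) (fun x => x)).foldl rleStep [])
          (fun p => p.2) (fun p => p.1)).flatMap (fun p => [p.1, p.2]) := by
  have hcol : pvCol arr j = (List.range arr.length).map (fun i => pvAt arr i j) := rfl
  set col := pvCol arr j with hc
  set fcol := col.filter (fun v => decide (v ≠ 0)) with hf
  set vals := PySem.List.sorted fcol (fun x => x) with hvals
  -- A side set = ofList (fcol.reverse.map g)
  show (PySem.List.sorted2 (col.reverse.foldl (fun s a =>
      if a ≠ 0 then PySem.Set.add s (a, (col.reverse.count a : Int)) else s) PySem.Set.empty)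
      (fun x => x.2) (fun x => x.1)).flatMap (fun s => [s.1, s.2]) = _
  have hA : col.reverse.foldl (fun s a =>
      if a ≠ 0 then PySem.Set.add s (a, (col.reverse.count a : Int)) else s) PySem.Set.empty =
      PySem.Set.ofList (fcol.reverse.map (fun a => (a, (fcol.count a : Int)))) := by
    rw [PySem.List.foldl_ite_eq_foldl_filter, ← PySem.Set.update_map_eq_foldl_add,
      PySem.Set.update_empty, List.filter_reverse, ← hf]
    congr 1
    apply List.map_congr_left
    intro a ha
    have hmem : a ∈ fcol := List.mem_reverse.mp ha
    have hpa : a ≠ 0 := by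
      have := List.of_mem_filter (p := fun v : Int => decide (v ≠ 0)) hmem
      simpa using this
    rw [List.count_reverse, ← List.count_filter (p := fun v : Int => decide (v ≠ 0)) (l := col) (by simpa using hpa), ← hf]
  rw [hA]
  -- B side run list = reverse of the head-building loop, with the RleOk invariant
  have hsorted : vals.Pairwise (· ≤ ·) := by
    have := PySem.List.sorted_pairwise (xs := fcol) (key := fun x => x)
    simpa using this
  have hok := pvRleOk vals hsorted
  obtain ⟨hokpw, hokmem, _, _⟩ := hok
  have hrev : vals.foldl rleStep [] = (vals.foldl rleStepH []).reverse := by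
    have := pvRleFold_rev vals []
    simpa using this
  have hpermv : vals.Perm fcol := PySem.List.sorted_perm fcol (fun x => x) false
  -- both pair lists are nodup with the same members, hence permutations of each other
  have hnodB : (vals.foldl rleStep []).Nodup := by
    rw [hrev, List.nodup_reverse]
    exact List.Nodup.of_map Prod.fst (hokpw.imp (fun h => ne_of_gt h))
  have hnodA : (PySem.Set.ofList (fcol.reverse.map (fun a => (a, (fcol.count a : Int))))).Nodup :=
    PySem.Set.nodup_ofList _
  have hperm : (PySem.Set.ofList (fcol.reverse.map (fun a => (a, (fcol.count a : Int))))).Perm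
      (vals.foldl rleStep []) := by
    rw [List.perm_ext_iff_of_nodup hnodA hnodB]
    intro x
    have hBmem : x ∈ vals.foldl rleStep [] ↔ x.1 ∈ fcol ∧ x.2 = (fcol.count x.1 : Int) := by
      rw [hrev, List.mem_reverse, hokmem x, hpermv.mem_iff, hpermv.count_eq]
    rw [hBmem, PySem.Set.mem_ofList, List.mem_map]
    constructor
    · rintro ⟨a, ha, rfl⟩
      exact ⟨List.mem_reverse.mp ha, rfl⟩
    · rintro ⟨h1, h2⟩
      exact ⟨x.1, List.mem_reverse.mpr h1, by obtain ⟨x1, x2⟩ := x; simp only at h2; simp [h2]⟩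
  have hsort : PySem.List.sorted2 (PySem.Set.ofList (fcol.reverse.map (fun a => (a, (fcol.count a : Int)))))
      (fun x => x.2) (fun x => x.1) =
      PySem.List.sorted2 (vals.foldl rleStep []) (fun x => x.2) (fun x => x.1) := by
    rw [pvSorted2Lex, pvSorted2Lex]
    apply PySem.List.sorted_eq_sorted_of_perm
    · intro a b h
      have := congrArg ofLex h
      simp at this
      exact Prod.ext this.2 this.1
    · exact hperm
  rw [hsort]
  rfl

-- row-j view of the doubly nested write loop, complement of pvOuter for out-of-range rows
theorem pvOuterGe (F : Nat → Nat → List Int → List Int) (m : Nat) :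
    ∀ (n : Nat) (g : List (List Int)) (j : Nat), ¬ j < m →
      ((List.range n).foldl (fun g' i => (List.range m).foldl (fun g2 t => g2.modify t (F i t)) g') g)[j]? = g[j]? := by
  intro n
  induction n with
  | zero => intro g j hj; simp
  | succ n ih =>
    intro g j hj
    rw [List.range_succ, List.foldl_append]
    simp only [List.foldl_cons, List.foldl_nil]
    rw [pvInner, if_neg hj, ih g j hj]

-- the doubly nested write loop over a fresh m × R zero grid, row by row
theorem pvGrid (F : Nat → Nat → List Int → List Int) (m n R : Nat) (base : Nat → List Int)
    (hrow : ∀ j, j < m →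
      (List.range n).foldl (fun row i => F i j row) (List.replicate R 0) = base j) :
    (List.range n).foldl (fun g' i => (List.range m).foldl (fun g2 t => g2.modify t (F i t)) g')
        ((List.range m).map (fun _ => List.replicate R 0)) =
      (List.range m).map base := by
  apply List.ext_getElem?
  intro j
  by_cases hj : j < m
  · rw [pvOuter F m n _ j hj]
    simp only [List.getElem?_map, List.getElem?_range hj, Option.map_some]
    rw [hrow j hj]
  · rw [pvOuterGe F m n _ j hj]
    rw [List.getElem?_eq_none (by simpa using Nat.le_of_not_lt hj),
        List.getElem?_eq_none (by simpa using Nat.le_of_not_lt hj)]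

-- the rotation writes produce the reversed column
theorem pvRotRow (arr : List (List Int)) (k : Nat) :
    (List.range arr.length).foldl
        (fun row i => row.set (arr.length - i - 1) (pvAt arr i k)) (List.replicate arr.length 0) =
      (pvCol arr k).reverse := by
  apply List.ext_getElem?
  intro kk
  rw [pvRowSet arr.length (fun i => pvAt arr i k) arr.length le_rfl kk]
  have hlen : (pvCol arr k).length = arr.length := by simp [pvCol]
  by_cases hk : kk < arr.length
  · rw [if_pos hk, List.getElem?_reverse (by omega), hlen]
    simp [pvCol, List.getElem?_map, List.getElem?_range (show arr.length - 1 - kk < arr.length by omega)]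
  · rw [if_neg hk, List.getElem?_eq_none (by simp [hlen]; omega)]

-- the conditional transpose writes produce the column map (zero is written either way)
theorem pvTransRow (arr2 : List (List Int)) (j : Nat) :
    (List.range arr2.length).foldl
        (fun row i => if pvAt arr2 i j ≠ 0 then row.set i (pvAt arr2 i j) else row)
        (List.replicate arr2.length 0) =
      (List.range arr2.length).map (fun i => pvAt arr2 i j) := by
  apply List.ext_getElem?
  intro k
  rw [pvRowSetIf arr2.length (fun i => pvAt arr2 i j) arr2.length le_rfl k]
  by_cases hk : k < arr2.length
  · rw [if_pos hk]
    simp [List.getElem?_range hk]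
    by_cases hw : pvAt arr2 k j = 0 <;> simp [hw]
    omega
  · rw [if_neg hk, List.getElem?_eq_none (by simpa using Nat.le_of_not_lt hk)]

-- a conditional modify is an unconditional modify of a conditional row update
theorem pvCondModify (g2 : List (List Int)) (j : Nat) (c : Prop) [Decidable c] (f : List Int → List Int) :
    (if c then g2.modify j f else g2) = g2.modify j (fun r => if c then f r else r) := by
  by_cases hc : c
  · simp [hc]
  · have : (fun r : List Int => r) = id := rfl
    simp [hc, this, List.modify_id]

-- B's per-column compressed lists, its padded form and the common length (proof-side names)
def pvColsB (arr : List (List Int)) : List (List Int) :=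
  (List.range (arr.getD 0 []).length).map (fun j =>
    (PySem.List.sorted2
        ((PySem.List.sorted (((List.range arr.length).map (fun i => pvAt arr i j)).filter
            (fun v => decide (v ≠ 0))) (fun x => x)).foldl rleStep [])
        (fun p => p.2) (fun p => p.1)).flatMap (fun p => [p.1, p.2]))

def pvL (arr : List (List Int)) : Int :=
  max 3 ((PySem.List.max? ((pvColsB arr).map (fun c => (c.length : Int))) (fun x => x)).getD 0)

def pvMid (arr : List (List Int)) : List (List Int) :=
  if pvL arr ≥ 100 then (pvColsB arr).map (fun c => c.take 100)
  else (pvColsB arr).map (fun c => c ++ List.replicate (pvL arr - (c.length : Int)).toNat 0)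

theorem pvMidLen (arr : List (List Int)) : (pvMid arr).length = (arr.getD 0 []).length := by
  unfold pvMid
  split <;> simp [pvColsB]

-- A's rotate + r_operation pipeline lands exactly on B's padded column lists
theorem pvKey (arr : List (List Int)) (hm : (arr.getD 0 []).length ≠ 0) :
    r_operation ((List.range (arr.getD 0 []).length).map (fun j => (pvCol arr j).reverse)) =
      pvMid arr := by
  unfold r_operation
  rw [PySem.List.foldl_append_singleton_eq_map, List.nil_append, List.map_map]
  have h2 : (List.range (arr.getD 0 []).length).map (rRow ∘ fun j => (pvCol arr j).reverse) =
      pvColsB arr := by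
    unfold pvColsB
    apply List.map_congr_left
    intro j _
    exact pvColEq arr j
  rw [h2]
  unfold plus_zero
  have hmax : (pvColsB arr).foldl (fun acc row => max acc ((row.length : Int))) 3 = pvL arr := by
    rw [← List.foldl_map (f := fun c : List Int => (c.length : Int)) (g := fun (x y : Int) => max x y)]
    obtain ⟨c, rest, hc⟩ : ∃ c rest, pvColsB arr = c :: rest := by
      cases hcb : pvColsB arr with
      | nil =>
        exfalso
        apply hm
        have hl : (pvColsB arr).length = (arr.getD 0 []).length := by simp [pvColsB]
        rw [hcb] at hl
        simpa using hl.symm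
      | cons c rest => exact ⟨c, rest, rfl⟩
    rw [hc]
    unfold pvL
    rw [hc]
    simp only [List.map_cons, List.foldl_cons, PySem.List.max?_id_cons, Option.getD_some]
    exact pvFoldlMaxShift _ 3 _
  rw [hmax]
  unfold pvMid
  rfl

-- ===== VERDICT (by name: the statement is the Claim_ definition above) =====
theorem c_operation_spec : Claim_equal_c_operation := by
  intro arr _ hpre
  unfold Spec_c_operation
  show c_operation arr = c_operation_alt arr
  have hm : (arr.getD 0 []).length ≠ 0 := by
    have := hpre.2.1
    intro h
    exact this (List.eq_nil_of_length_eq_zero h)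
  have hB : c_operation_alt arr =
      (List.range ((pvMid arr).getD 0 []).length).map
        (fun j => (List.range (arr.getD 0 []).length).map (fun i => pvAt (pvMid arr) i j)) := rfl
  have hA : c_operation arr =
      (List.range ((pvMid arr).getD 0 []).length).map
        (fun j => (List.range (pvMid arr).length).map (fun i => pvAt (pvMid arr) i j)) := by
    unfold c_operation
    show (let arr2 := r_operation ((List.range arr.length).foldl
          (fun g i => (List.range (arr.getD 0 []).length).foldl
              (fun g2 j => g2.modify j (fun r => r.set (arr.length - i - 1) (pvAt arr i j))) g)
          ((List.range (arr.getD 0 []).length).map (fun _ => List.replicate arr.length 0)));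
        (List.range arr2.length).foldl
          (fun g i => (List.range (arr2.getD 0 []).length).foldl
              (fun g2 j => if pvAt arr2 i j ≠ 0 then g2.modify j (fun r => r.set i (pvAt arr2 i j)) else g2) g)
          ((List.range (arr2.getD 0 []).length).map (fun _ => List.replicate arr2.length 0))) = _
    have h1 : (List.range arr.length).foldl (fun g i => (List.range (arr.getD 0 []).length).foldl
        (fun g2 j => g2.modify j (fun r => r.set (arr.length - i - 1) (pvAt arr i j))) g)
        ((List.range (arr.getD 0 []).length).map (fun _ => List.replicate arr.length 0)) =
        (List.range (arr.getD 0 []).length).map (fun j => (pvCol arr j).reverse) :=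
      pvGrid _ _ _ _ _ (fun j _ => pvRotRow arr j)
    rw [h1, pvKey arr hm]
    show (List.range (pvMid arr).length).foldl
        (fun g i => (List.range ((pvMid arr).getD 0 []).length).foldl
            (fun g2 j => if pvAt (pvMid arr) i j ≠ 0 then g2.modify j (fun r => r.set i (pvAt (pvMid arr) i j)) else g2) g)
        ((List.range ((pvMid arr).getD 0 []).length).map (fun _ => List.replicate (pvMid arr).length 0)) = _
    have hstep : (fun (g : List (List Int)) (i : Nat) =>
        (List.range ((pvMid arr).getD 0 []).length).foldl
          (fun g2 j => if pvAt (pvMid arr) i j ≠ 0 then g2.modify j (fun r => r.set i (pvAt (pvMid arr) i j)) else g2) g) =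
        (fun g i => (List.range ((pvMid arr).getD 0 []).length).foldl
          (fun g2 j => g2.modify j (fun r => if pvAt (pvMid arr) i j ≠ 0 then r.set i (pvAt (pvMid arr) i j) else r)) g) := by
      funext g i
      congr 1
      funext g2 j
      exact pvCondModify g2 j _ _
    rw [hstep]
    exact pvGrid _ _ _ _ _ (fun j _ => pvTransRow (pvMid arr) j)
  rw [hA, hB, pvMidLen]
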